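-- pv_equiv track=rewrite | github.com/nielrenned/aoc2025 | solutions/day01.py | part1
-- ===== SOURCE A (Python) =====
-- def part1(input):
--     dial = 50
--     count = 0
--     for dir, clicks in input:
--         sign = -1 if dir == 'R' else 1
--         dial = (dial + sign*clicks) % 100
--         if dial == 0: count += 1
--     return count
-- ===== SOURCE B (Python) =====
-- def part1(input):
--     # Divide and conquer: go(seg, base) returns (zero-hit count, total signed
--     # displacement) for the segment seg entered with unreduced dial position base.
--     # Correct because the dial after k steps is (50 + prefix-sum) and zero-hits of
--     # a concatenation are zero-hits of the left half plus zero-hits of the right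
--     # half entered at base + (left half's displacement).
--     def go(seg, base):
--         if len(seg) == 1:
--             d, c = seg[0]
--             step = -c if d == 'R' else c
--             return (1 if (base + step) % 100 == 0 else 0, step)
--         mid = len(seg) // 2
--         c1, s1 = go(seg[:mid], base)
--         c2, s2 = go(seg[mid:], base + s1)
--         return (c1 + c2, s1 + s2)
--     if not input:
--         return 0
--     return go(input, 50)[0]
-- ===== Notes on version B (the rewrite author's own statement) =====
-- stated objective: alternative
-- what changed: B is a divide-and-conquer recursion: each half-segment returns (zero-hit count, total signed displacement), combined by entering the right half at base plus the left half's displacement, instead of A's fused left-to-right mod-100 dial loop.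
import Mathlib
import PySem

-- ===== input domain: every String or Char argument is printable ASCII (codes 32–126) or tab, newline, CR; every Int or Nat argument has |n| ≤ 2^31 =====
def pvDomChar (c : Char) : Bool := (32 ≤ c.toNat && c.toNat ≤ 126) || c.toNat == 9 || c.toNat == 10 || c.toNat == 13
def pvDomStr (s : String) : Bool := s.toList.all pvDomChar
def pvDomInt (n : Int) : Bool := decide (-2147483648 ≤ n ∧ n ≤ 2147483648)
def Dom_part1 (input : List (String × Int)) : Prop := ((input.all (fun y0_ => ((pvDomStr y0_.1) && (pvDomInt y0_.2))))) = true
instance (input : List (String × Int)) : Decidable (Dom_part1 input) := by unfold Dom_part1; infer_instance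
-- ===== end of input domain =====

-- B replaces A's fused left-to-right mod-100 dial loop by a divide-and-conquer
-- recursion where each half-segment returns (zero-hit count, signed displacement)
-- (alternative decomposition, not claimed faster).

-- ===== PORT A =====
def part1 (input : List (String × Int)) : Int :=
  (input.foldl (fun (st : Int × Int) p =>
    let sign : Int := if p.1 == "R" then -1 else 1
    let dial := PySem.Int.mod (st.1 + sign * p.2) 100
    (dial, if dial == 0 then st.2 + 1 else st.2)) (50, 0)).2

-- ===== PORT B =====
-- Source B's inner `go`; the [] case is only a totality guard (Source B never calls go on []).
def part1go : List (String × Int) → Int → Int × Int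
  | [], _ => (0, 0)
  | [p], base =>
      let step := if p.1 == "R" then -p.2 else p.2
      ((if PySem.Int.mod (base + step) 100 == 0 then 1 else 0), step)
  | p :: q :: r, base =>
      let seg := p :: q :: r
      let mid := seg.length / 2
      let r1 := part1go (seg.take mid) base
      let r2 := part1go (seg.drop mid) (base + r1.2)
      (r1.1 + r2.1, r1.2 + r2.2)
termination_by seg _ => seg.length
decreasing_by
  · simp; omega
  · simp; omega

def part1_alt (input : List (String × Int)) : Int :=
  if input.isEmpty then 0 else (part1go input 50).1

-- ===== PRECONDITION & SPEC =====
def Spec_part1 (input : List (String × Int)) (out : Int) : Prop := out = part1_alt input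
instance (input : List (String × Int)) (out : Int) : Decidable (Spec_part1 input out) := by unfold Spec_part1; infer_instance

-- ===== CLAIM (what is proved, stated in full; the proofs are below) =====
def Claim_equal_part1 : Prop := ∀ (input : List (String × Int)), Dom_part1 input → Spec_part1 input (part1 input)

-- ===== LEMMAS AND PROOFS =====

/-- The signed step of one instruction. -/
def pvStep (p : String × Int) : Int := if p.1 == "R" then -p.2 else p.2

/-- Total signed displacement of a segment. -/
def pvS : List (String × Int) → Int
  | [] => 0
  | p :: l => pvStep p + pvS l

/-- Number of zero-landings of a segment entered at unreduced position `b`. -/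
def pvZ (b : Int) : List (String × Int) → Int
  | [] => 0
  | p :: l => (if PySem.Int.mod (b + pvStep p) 100 == 0 then 1 else 0) + pvZ (b + pvStep p) l

lemma pvS_append (l1 l2 : List (String × Int)) : pvS (l1 ++ l2) = pvS l1 + pvS l2 := by
  induction l1 with
  | nil => simp [pvS]
  | cons p l ih => simp [pvS, ih]; ring

lemma pvZ_append (l1 l2 : List (String × Int)) : ∀ b,
    pvZ b (l1 ++ l2) = pvZ b l1 + pvZ (b + pvS l1) l2 := by
  induction l1 with
  | nil => intro b; simp [pvZ, pvS]
  | cons p l ih =>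
    intro b
    simp only [List.cons_append, pvZ, pvS, ih]
    ring_nf

lemma part1go_spec : ∀ (n : Nat) (seg : List (String × Int)) (b : Int),
    seg.length ≤ n → seg ≠ [] → part1go seg b = (pvZ b seg, pvS seg) := by
  intro n
  induction n with
  | zero => intro seg b hle hne; cases seg <;> simp_all
  | succ n ih =>
    intro seg b hle hne
    match seg with
    | [p] => simp [part1go, pvZ, pvS, pvStep]
    | p :: q :: r =>
      rw [part1go]
      have hlen : (p :: q :: r).length = r.length + 2 := by simp
      set seg := p :: q :: r with hseg
      set mid := seg.length / 2 with hmid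
      have hmid1 : 1 ≤ mid := by omega
      have hmidlt : mid < seg.length := by omega
      have h1 : part1go (seg.take mid) b = (pvZ b (seg.take mid), pvS (seg.take mid)) := by
        apply ih
        · have := seg.length_take_le mid; omega
        · intro h
          have := congrArg List.length h
          simp [min_eq_left (Nat.le_of_lt hmidlt)] at this
          omega
      have h2 : part1go (seg.drop mid) (b + pvS (seg.take mid))
          = (pvZ (b + pvS (seg.take mid)) (seg.drop mid), pvS (seg.drop mid)) := by
        apply ih
        · simp [List.length_drop]; omega
        · intro h
          have := congrArg List.length h
          simp [List.length_drop] at this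
          omega
      simp only [h1, h2]
      have hsplit : seg = seg.take mid ++ seg.drop mid := (List.take_append_drop mid seg).symm
      have hz : pvZ b seg = pvZ b (seg.take mid) + pvZ (b + pvS (seg.take mid)) (seg.drop mid) := by
        conv_lhs => rw [hsplit]
        rw [pvZ_append]
      have hs : pvS seg = pvS (seg.take mid) + pvS (seg.drop mid) := by
        conv_lhs => rw [hsplit]
        rw [pvS_append]
      rw [hz, hs]

lemma pvMod_mod (a b : Int) :
    PySem.Int.mod (PySem.Int.mod a 100 + b) 100 = PySem.Int.mod (a + b) 100 := by
  simp only [PySem.Int.mod_eq_emod_of_pos (show (0:Int) < 100 by norm_num)]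
  omega

lemma pvAfold (l : List (String × Int)) : ∀ (b c : Int),
    (l.foldl (fun (st : Int × Int) p =>
      let sign : Int := if p.1 == "R" then -1 else 1
      let dial := PySem.Int.mod (st.1 + sign * p.2) 100
      (dial, if dial == 0 then st.2 + 1 else st.2)) (PySem.Int.mod b 100, c)).2
    = c + pvZ b l := by
  induction l with
  | nil => intro b c; simp [pvZ]
  | cons p l ih =>
    intro b c
    have hstep : (if p.1 == "R" then (-1 : Int) else 1) * p.2 = pvStep p := by
      unfold pvStep; split <;> ring
    simp only [List.foldl, hstep, pvMod_mod]
    rw [ih (b + pvStep p)]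
    simp only [pvZ]
    split <;> ring

-- ===== VERDICT (by name: the statement is the Claim_ definition above) =====
theorem part1_spec : Claim_equal_part1 := by
  intro input _
  show part1 input = part1_alt input
  cases input with
  | nil => rfl
  | cons p l =>
    unfold part1 part1_alt
    rw [show ((50:Int),(0:Int)) = (PySem.Int.mod 50 100, 0) from by decide]
    rw [pvAfold (p :: l) 50 0]
    rw [part1go_spec (p :: l).length (p :: l) 50 le_rfl (by simp)]
    simp
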